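-- pv_equiv track=rewrite | github.com/GHLisz/algorithm-exercises | lintcode/1099-non-decreasing-array.py | checkPossibility
-- ===== SOURCE A (Python) =====
-- def checkPossibility(nums):
--     # Write your code here
--     p = None
--     for i in range(len(nums) - 1):
--         if nums[i] > nums[i + 1]:
--             if p is not None:
--                 return False
--             p = i
--
--     return (p is None
--             or p == 0
--             or p == len(nums) - 2
--             or nums[p - 1] <= nums[p + 1]
--             or nums[p] <= nums[p + 2])
-- ===== SOURCE B (Python) =====
-- def checkPossibility(nums):
--     # One-pass greedy with rolling state (prev2, prev); never indexes or mutates nums.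
--     used = False
--     prev2 = None
--     prev = None
--     for x in nums:
--         if prev is not None and prev > x:
--             if used:
--                 return False
--             used = True
--             if prev2 is None or prev2 <= x:
--                 prev2, prev = x, x      # lower the peak
--             else:
--                 prev2 = prev            # raise the valley; prev unchanged
--         else:
--             prev2, prev = prev, x
--     return True
-- ===== Notes on version B (the rewrite author's own statement) =====
-- stated objective: idiomatic
-- what changed: A locates the single descent index and then tests an or-chain of neighbour lookups on the original array; B is the canonical one-pass greedy repair that carries a rolling (prev2, prev, used) state, lowering the peak or raising the valley at the first descent and failing on a second, with no index arithmetic at all.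
import Mathlib
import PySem

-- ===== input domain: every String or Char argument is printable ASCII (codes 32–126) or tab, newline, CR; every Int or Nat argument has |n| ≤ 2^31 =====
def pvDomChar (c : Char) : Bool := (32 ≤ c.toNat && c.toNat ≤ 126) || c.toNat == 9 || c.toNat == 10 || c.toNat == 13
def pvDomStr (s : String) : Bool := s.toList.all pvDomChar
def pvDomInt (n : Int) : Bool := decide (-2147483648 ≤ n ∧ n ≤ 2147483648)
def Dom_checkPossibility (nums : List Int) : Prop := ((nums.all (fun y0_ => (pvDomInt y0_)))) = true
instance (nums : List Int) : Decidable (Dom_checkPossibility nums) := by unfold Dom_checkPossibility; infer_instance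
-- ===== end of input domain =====

-- B replaces A's locate-the-descent-then-test-indices scheme by the canonical one-pass
-- greedy repair with rolling state (no indexing); objective: idiomatic, same O(n) cost.

-- ===== PORT A =====
-- A's loop: `for i in range(len(nums)-1)` with early `return False` (= `none`) and the
-- final `p` (= `some p`).  The in-loop indices `i`, `i+1` are always in range
-- (0 ≤ i ≤ len-2), so `pyGetD … 0` is exact here.
def aLoop (nums : List Int) (idxs : List Int) (p : Option Int) : Option (Option Int) :=
  match idxs with
  | [] => some p
  | i :: rest =>
    if PySem.List.pyGetD nums i 0 > PySem.List.pyGetD nums (i + 1) 0 then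
      match p with
      | some _ => none            -- `return False`
      | none => aLoop nums rest (some i)
    else aLoop nums rest p

-- A's final `or`-chain, as a short-circuiting if-chain.  The lookups `nums[p-1]`,
-- `nums[p+1]`, `nums[p+2]` are only reached when the earlier disjuncts ruled out
-- p = 0 and p = len-2, so the indices are in range and `pyGetD … 0` is exact.
def aFinish (nums : List Int) (res : Option (Option Int)) : Bool :=
  match res with
  | none => false
  | some none => true
  | some (some p) =>
    if p = 0 then true
    else if p = (nums.length : Int) - 2 then true
    else if PySem.List.pyGetD nums (p - 1) 0 ≤ PySem.List.pyGetD nums (p + 1) 0 then true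
    else decide (PySem.List.pyGetD nums p 0 ≤ PySem.List.pyGetD nums (p + 2) 0)

def checkPossibility (nums : List Int) : Bool :=
  aFinish nums (aLoop nums (PySem.List.pyRange 0 ((nums.length : Int) - 1) 1) none)

-- ===== PORT B =====
-- B's loop: rolling state (prev2, prev, used), one element at a time.
def bGo (prev2 prev : Option Int) (used : Bool) (l : List Int) : Bool :=
  match l with
  | [] => true
  | x :: rest =>
    match prev with
    | none => bGo prev (some x) used rest
    | some pv =>
      if pv > x then
        if used then false
        else
          match prev2 with
          | none => bGo (some x) (some x) true rest          -- lower the peak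
          | some q =>
            if q ≤ x then bGo (some x) (some x) true rest    -- lower the peak
            else bGo (some pv) (some pv) true rest           -- raise the valley
      else bGo prev (some x) used rest

def checkPossibility_alt (nums : List Int) : Bool :=
  bGo none none false nums

-- ===== PRECONDITION & SPEC =====
def Spec_checkPossibility (nums : List Int) (out : Bool) : Prop := out = checkPossibility_alt nums
instance (nums : List Int) (out : Bool) : Decidable (Spec_checkPossibility nums out) := by unfold Spec_checkPossibility; infer_instance

-- ===== CLAIM (what is proved, stated in full; the proofs are below) =====
def Claim_equal_checkPossibility : Prop := ∀ (nums : List Int), Dom_checkPossibility nums → Spec_checkPossibility nums (checkPossibility nums)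

-- ===== LEMMAS AND PROOFS =====

-- `noDescL l = true` iff l has no descent between consecutive elements.
def noDescL : List Int → Bool
  | a :: b :: r => (decide (a ≤ b)) && noDescL (b :: r)
  | _ => true

-- Structural version of A's loop: walks the suffix of `nums` directly, `i` is the
-- index of the head of the current suffix.
def aStr : List Int → Int → Option Int → Option (Option Int)
  | a :: b :: r, i, p =>
    if a > b then
      match p with
      | some _ => none
      | none => aStr (b :: r) (i + 1) (some i)
    else aStr (b :: r) (i + 1) p
  | _, _, p => some p

lemma bGo_used (l : List Int) : ∀ (p2 : Option Int) (v : Int),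
    bGo p2 (some v) true l = noDescL (v :: l) := by
  induction l with
  | nil => intro _ _; rfl
  | cons x r ih =>
    intro p2 v
    by_cases h : v > x
    · simp [bGo, noDescL, h, show ¬ (v ≤ x) by omega]
    · simp [bGo, noDescL, h, show v ≤ x by omega, ih]

lemma aStr_some (l : List Int) : ∀ (i p : Int),
    aStr l i (some p) = if noDescL l then some (some p) else none := by
  induction l with
  | nil => intro _ _; rfl
  | cons a r ih =>
    intro i p
    cases r with
    | nil => rfl
    | cons b r2 =>
      by_cases h : a > b
      · simp [aStr, noDescL, h, show ¬ (a ≤ b) by omega]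
      · simp [aStr, noDescL, h, show a ≤ b by omega, ih]


lemma pyGetD_int (nums : List Int) (i : Int) (n : Nat) (hi : i = (n : Int))
    (h : n < nums.length) : PySem.List.pyGetD nums i 0 = nums[n] := by
  subst hi; simp [List.getElem?_eq_getElem h]

lemma pyGetD_toGetD (nums : List Int) (i : Int) (n : Nat) (hi : i = (n : Int)) :
    PySem.List.pyGetD nums i 0 = nums.getD n 0 := by
  subst hi; simp [List.getD_eq_getElem?_getD]

lemma aLoop_eq_aStr (nums : List Int) (k : Nat) : ∀ (j : Nat) (p : Option Int),
    nums.length - j ≤ k →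
    aLoop nums (PySem.List.pyRange (j : Int) ((nums.length : Int) - 1) 1) p
      = aStr (nums.drop j) (j : Int) p := by
  induction k with
  | zero =>
    intro j p hk
    rw [PySem.List.pyRange_one_eq_nil (by omega)]
    rw [List.drop_eq_nil_of_le (by omega)]
    rfl
  | succ k ih =>
    intro j p hk
    by_cases h : (j : Int) < (nums.length : Int) - 1
    · have hj : j < nums.length := by push_cast at h; omega
      have hj1 : j + 1 < nums.length := by push_cast at h; omega
      have hga : PySem.List.pyGetD nums ((j : Int)) 0 = nums[j] := by
        simp [List.getElem?_eq_getElem hj]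
      have hgb : PySem.List.pyGetD nums ((j : Int) + 1) 0 = nums[j + 1] :=
        pyGetD_int nums _ (j + 1) (by push_cast; ring) hj1
      have e1 : ∀ q, aLoop nums (PySem.List.pyRange ((j : Int) + 1) ((nums.length : Int) - 1) 1) q
          = aStr (nums[j + 1] :: nums.drop (j + 2)) ((j : Int) + 1) q := by
        intro q
        have h2 := ih (j + 1) q (by omega)
        rw [List.drop_eq_getElem_cons hj1] at h2
        push_cast at h2 ⊢
        exact h2
      rw [PySem.List.pyRange_one_cons h, List.drop_eq_getElem_cons hj,
        List.drop_eq_getElem_cons hj1]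
      by_cases hcmp : nums[j] > nums[j + 1]
      · simp only [aLoop, aStr, hga, hgb, if_pos hcmp]
        cases p with
        | some q => rfl
        | none => exact e1 (some (j : Int))
      · simp only [aLoop, aStr, hga, hgb, if_neg hcmp]
        exact e1 p
    · rw [PySem.List.pyRange_one_eq_nil (by omega)]
      have hlen : nums.length ≤ j + 1 := by push_cast at h; omega
      cases hd : nums.drop j with
      | nil => rfl
      | cons a t =>
        cases t with
        | nil => rfl
        | cons b t2 =>
          exfalso
          have := congrArg List.length hd
          simp at this
          omega

lemma main_inv (nums : List Int) (r' : List Int) : ∀ (j : Nat) (a : Int) (p2 : Option Int),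
    nums.drop j = a :: r' →
    p2 = (if j = 0 then none else some (nums.getD (j - 1) 0)) →
    aFinish nums (aStr (a :: r') (j : Int) none) = bGo p2 (some a) false r' := by
  induction r' with
  | nil => intro j a p2 _ _; simp [aStr, aFinish, bGo]
  | cons b r ih =>
    intro j a p2 hdrop hp2
    have hlen : nums.length = j + 2 + r.length := by
      have := congrArg List.length hdrop; simp at this; omega
    have hj : j < nums.length := by omega
    have h1 : j + 1 < nums.length := by omega
    have e := hdrop
    rw [List.drop_eq_getElem_cons hj, List.drop_eq_getElem_cons h1] at e
    simp only [List.cons.injEq] at e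
    obtain ⟨ea, eb, er⟩ := e
    by_cases hab : a > b
    · -- the (first) descent: A records p = j and keeps scanning, B repairs and keeps scanning
      have hstep : aStr (a :: b :: r) (j : Int) none
          = if noDescL (b :: r) then some (some (j : Int)) else none := by
        simp only [aStr, if_pos hab]
        exact aStr_some (b :: r) ((j : Int) + 1) (j : Int)
      rw [hstep]
      have hgb' : PySem.List.pyGetD nums ((j : Int) + 1) 0 = b := by
        rw [pyGetD_int nums _ (j + 1) (by push_cast; ring) h1]; exact eb
      by_cases hj0 : j = 0
      · -- p = 0: A's formula is true; B lowers the peak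
        subst hj0
        rw [hp2]
        cases hnd : noDescL (b :: r) <;>
          simp [aFinish, bGo, hab, bGo_used, hnd]
      · -- j ≥ 1: p2 = some nums[j-1]
        have hq : p2 = some (nums.getD (j - 1) 0) := by rw [hp2, if_neg hj0]
        set q := nums.getD (j - 1) 0 with hqdef
        have hga' : PySem.List.pyGetD nums ((j : Int) - 1) 0 = q :=
          pyGetD_toGetD nums _ (j - 1) (by omega)
        have hjne : ¬ ((j : Int) = 0) := by omega
        rw [hq]
        by_cases hqb : q ≤ b
        · -- lower the peak; A's formula is true via nums[p-1] ≤ nums[p+1]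
          have hF : aFinish nums (if noDescL (b :: r) then some (some (j : Int)) else none)
              = noDescL (b :: r) := by
            cases hnd : noDescL (b :: r)
            · simp [aFinish]
            · simp [aFinish, hj0, hga', hgb', hqb]
          rw [hF]
          simp [bGo, hab, hqb, bGo_used]
        · -- raise the valley
          have hrhs : bGo (some q) (some a) false (b :: r) = noDescL (a :: r) := by
            simp [bGo, hab, hqb, bGo_used]
          rw [hrhs]
          cases r with
          | nil =>
            have hn2 : (j : Int) = (nums.length : Int) - 2 := by
              simp at hlen; omega
            simp [aFinish, noDescL, hn2]
          | cons c r2 =>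
            have hn2 : ¬ ((j : Int) = (nums.length : Int) - 2) := by
              simp at hlen; omega
            have h2 : j + 2 < nums.length := by simp at hlen; omega
            have er' := er
            rw [List.drop_eq_getElem_cons h2] at er'
            simp only [List.cons.injEq] at er'
            have hc : nums[j + 2] = c := er'.1
            have hgc : PySem.List.pyGetD nums ((j : Int) + 2) 0 = c := by
              rw [pyGetD_int nums _ (j + 2) (by push_cast; ring) h2]; exact hc
            have hga2 : PySem.List.pyGetD nums ((j : Int)) 0 = a := by
              rw [pyGetD_int nums _ j rfl hj]; exact ea
            cases hnd : noDescL (c :: r2)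
            · have hnd2 : noDescL (b :: c :: r2) = false := by simp [noDescL, hnd]
              simp [aFinish, noDescL, hnd]
            · by_cases hac : a ≤ c
              · have hbc : b ≤ c := by omega
                simp [aFinish, noDescL, hnd, hbc, hj0, hn2, hga', hgb', hgc, hga2, hqb, hac]
              · by_cases hbc : b ≤ c <;>
                  simp [aFinish, noDescL, hnd, hbc, hj0, hn2, hga', hgb', hgc, hga2, hqb, hac]
    · -- no descent here: both step forward
      have hstep : aStr (a :: b :: r) (j : Int) none = aStr (b :: r) ((j : Int) + 1) none := by
        simp [aStr, hab]
      have hdrop' : nums.drop (j + 1) = b :: r := by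
        rw [List.drop_eq_getElem_cons h1, eb, er]
      have hrec := ih (j + 1) b (some a) hdrop'
        (by rw [if_neg (Nat.succ_ne_zero j)]
            simp [List.getD_eq_getElem?_getD, List.getElem?_eq_getElem hj, ea])
      rw [hstep, show ((j : Int) + 1) = (((j + 1 : Nat)) : Int) by push_cast; ring, hrec]
      simp [bGo, show ¬ (a > b) from hab]

-- ===== VERDICT (by name: the statement is the Claim_ definition above) =====
theorem checkPossibility_spec : Claim_equal_checkPossibility := by
  intro nums _
  unfold Spec_checkPossibility
  cases nums with
  | nil => decide
  | cons x rest =>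
    have hb := aLoop_eq_aStr (x :: rest) (x :: rest).length 0 none (by omega)
    simp only [Nat.cast_zero] at hb
    rw [checkPossibility, checkPossibility_alt, hb, List.drop_zero]
    have hm := main_inv (x :: rest) rest 0 x none (by simp) (by simp)
    simpa [bGo] using hm
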